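-- pv_equiv track=rewrite | github.com/pypi-data/pypi-mirror-280 | packages/comicbot-api/comicbot_api-0.1.16-py3-none-any.whl/comicbot_api/version1/web_scraper.py | strip_comic_name
-- ===== SOURCE A (Python) =====
-- def strip_comic_name(name: str) -> str:
--     num_spaces = 0
--     new_name = ""
--     for char in name:
--         if char.isspace() and num_spaces > 1:
--             return str(new_name).strip()
--         elif char.isspace():
--             num_spaces += 1
--         new_name += char
--     return str(new_name)
-- ===== SOURCE B (Python) =====
-- def strip_comic_name(name: str) -> str:
--     idx = [i for i, c in enumerate(name) if c.isspace()]
--     if len(idx) >= 3: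
--         return name[:idx[2]].strip()
--     return name
-- ===== Notes on version B (the rewrite author's own statement) =====
-- stated objective: simpler
-- what changed: B builds the list of whitespace positions with enumerate in one comprehension and then either slices the string at the third position and strips, or returns the input unchanged, replacing A's character-by-character accumulator loop with counter and early return.
import Mathlib
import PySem

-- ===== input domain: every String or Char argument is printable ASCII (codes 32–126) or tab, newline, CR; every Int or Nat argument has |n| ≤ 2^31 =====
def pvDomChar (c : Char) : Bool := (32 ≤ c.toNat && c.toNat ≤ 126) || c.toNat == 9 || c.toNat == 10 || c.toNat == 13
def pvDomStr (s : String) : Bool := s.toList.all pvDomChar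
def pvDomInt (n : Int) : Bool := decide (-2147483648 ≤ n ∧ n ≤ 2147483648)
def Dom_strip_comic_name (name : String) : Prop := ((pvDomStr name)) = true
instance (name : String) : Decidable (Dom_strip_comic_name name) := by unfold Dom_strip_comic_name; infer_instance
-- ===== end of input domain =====

-- B precomputes the list of whitespace indices and slices once, instead of A's
-- accumulate-and-early-exit character loop (objective: simpler).

-- ===== PORT A =====
-- the for-loop over the characters: state = (num_spaces, new_name)
def stripLoopA : List Char → Nat → List Char → List Char
  | [], _, acc => acc
  | c :: rest, ns, acc =>
    if PySem.Chars.isspace c && decide (ns > 1) then PySem.Chars.strip acc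
    else if PySem.Chars.isspace c then stripLoopA rest (ns + 1) (acc ++ [c])
    else stripLoopA rest ns (acc ++ [c])

def strip_comic_name (name : String) : String :=
  String.ofList (stripLoopA name.toList 0 [])

-- ===== PORT B =====
-- the comprehension: [i for i, c in enumerate(name) if c.isspace()]
def wsIdx (cs : List Char) : List Int :=
  ((PySem.List.enumerate cs 0).filter (fun p => PySem.Chars.isspace p.2)).map (·.1)

def strip_comic_name_alt (name : String) : String :=
  let idx := wsIdx name.toList
  if 3 ≤ idx.length then
    String.ofList (PySem.Chars.strip
      (PySem.Chars.slice name.toList none (some (PySem.List.pyGetD idx 2 0))))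
  else name

-- ===== PRECONDITION & SPEC =====
def Spec_strip_comic_name (name : String) (out : String) : Prop := out = strip_comic_name_alt name
instance (name : String) (out : String) : Decidable (Spec_strip_comic_name name out) := by unfold Spec_strip_comic_name; infer_instance

-- ===== CLAIM (what is proved, stated in full; the proofs are below) =====
def Claim_equal_strip_comic_name : Prop := ∀ (name : String), Dom_strip_comic_name name → Spec_strip_comic_name name (strip_comic_name name)

-- ===== LEMMAS AND PROOFS =====

theorem enumerate_shift {α : Type} (xs : List α) (s : Int) :
    PySem.List.enumerate xs (s + 1) = (PySem.List.enumerate xs s).map (fun p => (p.1 + 1, p.2)) := by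
  induction xs generalizing s with
  | nil => rw [PySem.List.enumerate_nil, PySem.List.enumerate_nil, List.map_nil]
  | cons x xs ih =>
    rw [PySem.List.enumerate_cons, PySem.List.enumerate_cons, List.map_cons, ih (s + 1)]

theorem wsIdx_cons (c : Char) (rest : List Char) :
    wsIdx (c :: rest) =
      if PySem.Chars.isspace c then (0 : Int) :: (wsIdx rest).map (· + 1)
      else (wsIdx rest).map (· + 1) := by
  unfold wsIdx
  rw [PySem.List.enumerate_cons, show (0 : Int) + 1 = 0 + 1 from rfl, enumerate_shift]
  by_cases hws : PySem.Chars.isspace c <;>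
    simp [hws, List.filter_map, List.map_map, Function.comp_def]

theorem wsIdx_nonneg (cs : List Char) : ∀ i ∈ wsIdx cs, 0 ≤ i := by
  induction cs with
  | nil => simp [wsIdx, PySem.List.enumerate_nil]
  | cons c rest ih =>
    intro i hi
    rw [wsIdx_cons] at hi
    split at hi <;> simp only [List.mem_cons, List.mem_map] at hi
    · rcases hi with rfl | ⟨j, hj, rfl⟩
      · omega
      · have := ih j hj; omega
    · rcases hi with ⟨j, hj, rfl⟩
      have := ih j hj; omega

-- the loop invariant: with ns ≤ 2 whitespace already counted, the loop truncates at
-- the (3-ns)-th whitespace of the remaining input (stripping), or appends everything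
theorem stripLoopA_eq (cs : List Char) : ∀ (acc : List Char) (ns : Nat), ns ≤ 2 →
    stripLoopA cs ns acc =
      match (wsIdx cs)[2 - ns]? with
      | some i => PySem.Chars.strip (acc ++ cs.take i.toNat)
      | none => acc ++ cs := by
  induction cs with
  | nil => intro acc ns _; simp [stripLoopA, wsIdx, PySem.List.enumerate_nil]
  | cons c rest ih =>
    intro acc ns hns
    rw [wsIdx_cons]
    by_cases hws : PySem.Chars.isspace c
    · simp only [hws, if_true]
      by_cases h2 : ns > 1
      · have hns2 : ns = 2 := by omega
        subst hns2
        simp [stripLoopA, hws]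
      · have he : 2 - ns = (1 - ns) + 1 := by omega
        rw [he]
        simp only [List.getElem?_cons_succ, List.getElem?_map]
        rw [show stripLoopA (c :: rest) ns acc = stripLoopA rest (ns + 1) (acc ++ [c]) by
          simp [stripLoopA, hws, h2]]
        rw [ih (acc ++ [c]) (ns + 1) (by omega)]
        rw [show 2 - (ns + 1) = 1 - ns by omega]
        cases hi : (wsIdx rest)[1 - ns]? with
        | none => simp
        | some i =>
          have hnn : 0 ≤ i := wsIdx_nonneg rest i (List.mem_of_getElem? hi)
          simp only [Option.map_some]
          rw [show (i + 1).toNat = i.toNat + 1 by omega]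
          simp [List.take_succ_cons]
    · simp only [hws, Bool.false_eq_true, if_false]
      rw [show stripLoopA (c :: rest) ns acc = stripLoopA rest ns (acc ++ [c]) by
        simp [stripLoopA, hws]]
      rw [ih (acc ++ [c]) ns hns]
      simp only [List.getElem?_map]
      cases hi : (wsIdx rest)[2 - ns]? with
      | none => simp
      | some i =>
        have hnn : 0 ≤ i := wsIdx_nonneg rest i (List.mem_of_getElem? hi)
        simp only [Option.map_some]
        rw [show (i + 1).toNat = i.toNat + 1 by omega]
        simp [List.take_succ_cons]

-- ===== VERDICT (by name: the statement is the Claim_ definition above) =====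
theorem strip_comic_name_spec : Claim_equal_strip_comic_name := by
  intro name _
  unfold Spec_strip_comic_name strip_comic_name strip_comic_name_alt
  rw [stripLoopA_eq name.toList [] 0 (by omega)]
  by_cases h3 : 3 ≤ (wsIdx name.toList).length
  · simp only [h3, if_true]
    have h2 : 2 < (wsIdx name.toList).length := by omega
    have hget : PySem.List.pyGetD (wsIdx name.toList) 2 0 = (wsIdx name.toList)[2] := by
      rw [PySem.List.pyGetD_ofNat' (wsIdx name.toList) 2 0, List.getD_eq_getElem _ _ h2]
    have hnn : 0 ≤ (wsIdx name.toList)[2] :=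
      wsIdx_nonneg name.toList _ (List.getElem_mem h2)
    have hs : PySem.Chars.slice name.toList none (some ((wsIdx name.toList)[2]))
        = name.toList.take ((wsIdx name.toList)[2]).toNat := by
      rw [PySem.Chars.slice_eq_listSlice,
        show (wsIdx name.toList)[2] = (((wsIdx name.toList)[2].toNat : Nat) : Int) by omega,
        PySem.List.slice_to_natCast]
      simp
      omega
    rw [show (2 : Nat) - 0 = 2 from rfl, List.getElem?_eq_getElem h2, hget, hs]
    simp
  · simp only [h3, if_false]
    rw [show (wsIdx name.toList)[2 - 0]? = none by
      rw [List.getElem?_eq_none_iff]; omega]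
    simp
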